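-- pv_equiv track=rewrite | github.com/kor-noah-han/sas94-rag-chat | scripts/ingest/build_sas_pdf_hierarchy.py | find_toc_pages
-- ===== SOURCE A (Python) =====
-- def first_non_empty_lines(page_text: str, limit: int = 3) -> list[str]:
--     lines: list[str] = []
--     for raw_line in page_text.splitlines():
--         line = raw_line.strip()
--         if not line:
--             continue
--         lines.append(line)
--         if len(lines) >= limit:
--             break
--     return lines
--
-- def find_toc_pages(early_pages: list[str]) -> list[int]:
--     toc_pages: list[int] = []
--     started = False
--     for index, page_text in enumerate(early_pages, start=1):
--         headers = first_non_empty_lines(page_text)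
--         is_toc = any("Contents" in line for line in headers)
--         if is_toc:
--             started = True
--             toc_pages.append(index)
--             continue
--         if started:
--             break
--     return toc_pages
-- ===== SOURCE B (Python) =====
-- def _is_toc(page_text: str) -> bool:
--     headers = [ln.strip() for ln in page_text.splitlines() if ln.strip()][:3]
--     return any("Contents" in h for h in headers)
--
-- def find_toc_pages(early_pages: list[str]) -> list[int]:
--     flags = [_is_toc(page) for page in early_pages]
--     try:
--         start = flags.index(True)
--     except ValueError:
--         return []
--     end = start
--     while end < len(flags) and flags[end]:
--         end += 1
--     return list(range(start + 1, end + 1))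
-- ===== Notes on version B (the rewrite author's own statement) =====
-- stated objective: alternative
-- what changed: A's single streaming enumerate-pass with a `started` flag and early break is replaced by a per-page boolean table built with a filter/map/slice header predicate, then flags.index(True) (try/except) for the run start, a while-loop for the run end, and range() to emit the 1-based indices.
import Mathlib
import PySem

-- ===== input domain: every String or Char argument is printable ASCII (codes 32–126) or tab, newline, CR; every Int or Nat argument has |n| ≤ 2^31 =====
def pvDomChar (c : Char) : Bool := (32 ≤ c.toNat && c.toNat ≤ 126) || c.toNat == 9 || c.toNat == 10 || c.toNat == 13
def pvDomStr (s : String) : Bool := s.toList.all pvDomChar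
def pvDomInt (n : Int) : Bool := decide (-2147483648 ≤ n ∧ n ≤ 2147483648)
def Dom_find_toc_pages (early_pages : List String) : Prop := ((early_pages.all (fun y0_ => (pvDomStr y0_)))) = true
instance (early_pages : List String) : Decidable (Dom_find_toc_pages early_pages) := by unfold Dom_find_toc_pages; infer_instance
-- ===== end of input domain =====

-- B replaces A's single streaming pass with a `started` flag by a per-page boolean table,
-- `index` for the run start and a while-loop for the run end (objective: alternative decomposition, same cost).

-- ===== PORT A =====
-- loop of first_non_empty_lines: collects stripped non-empty lines, breaking at `limit`
def fnelGo (ls : List String) (acc : List String) (limit : Int) : List String :=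
  match ls with
  | [] => acc
  | raw :: rest =>
    let line := PySem.Str.strip raw
    if line = "" then fnelGo rest acc limit
    else
      let acc' := acc ++ [line]
      if limit ≤ (acc'.length : Int) then acc' else fnelGo rest acc' limit

def first_non_empty_lines (page_text : String) (limit : Int) : List String :=
  fnelGo (PySem.Str.splitlines page_text) [] limit

-- the enumerate loop of find_toc_pages, with its `started` flag and accumulator
def ftpGo (pages : List String) (idx : Int) (started : Bool) (acc : List Int) : List Int :=
  match pages with
  | [] => acc
  | p :: rest =>
    let headers := first_non_empty_lines p 3
    let is_toc := headers.any (fun l => PySem.Str.isIn "Contents" l)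
    if is_toc then ftpGo rest (idx + 1) true (acc ++ [idx])
    else if started then acc
    else ftpGo rest (idx + 1) started acc

def find_toc_pages (early_pages : List String) : List Int :=
  ftpGo early_pages 1 false []

-- ===== PORT B =====
-- _is_toc: [ln.strip() for ln in page_text.splitlines() if ln.strip()][:3], tested for "Contents"
def isToc (page_text : String) : Bool :=
  let headers := (((PySem.Str.splitlines page_text).filter
      (fun ln => !(PySem.Str.strip ln = ""))).map PySem.Str.strip).take 3
  headers.any (fun h => PySem.Str.isIn "Contents" h)

-- the `while end < len(flags) and flags[end]: end += 1` loop
def runEnd (flags : List Bool) (e : Nat) : Nat :=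
  if h : e < flags.length then
    if flags[e] then runEnd flags (e + 1) else e
  else e
termination_by flags.length - e

-- try/except ValueError around flags.index(True) → match on index? (none = ValueError)
def find_toc_pages_alt (early_pages : List String) : List Int :=
  let flags := early_pages.map isToc
  match PySem.List.index? flags true with
  | none => []
  | some start =>
      PySem.List.pyRange ((start : Int) + 1) ((runEnd flags start : Int) + 1) 1

-- ===== PRECONDITION & SPEC =====
def Spec_find_toc_pages (early_pages : List String) (out : List Int) : Prop := out = find_toc_pages_alt early_pages
instance (early_pages : List String) (out : List Int) : Decidable (Spec_find_toc_pages early_pages out) := by unfold Spec_find_toc_pages; infer_instance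

-- ===== CLAIM (what is proved, stated in full; the proofs are below) =====
def Claim_equal_find_toc_pages : Prop := ∀ (early_pages : List String), Dom_find_toc_pages early_pages → Spec_find_toc_pages early_pages (find_toc_pages early_pages)

-- ===== LEMMAS AND PROOFS =====

-- A's streaming header collection equals B's filter/map/take
theorem fnelGo_eq (ls : List String) : ∀ (acc : List String) (limit : Int),
    (acc.length : Int) < limit →
    fnelGo ls acc limit =
      acc ++ ((ls.filter (fun ln => !(PySem.Str.strip ln = ""))).map PySem.Str.strip).take
        (limit - acc.length).toNat := by
  induction ls with
  | nil => intro acc limit _; simp [fnelGo]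
  | cons raw rest ih =>
    intro acc limit h
    by_cases hs : PySem.Str.strip raw = ""
    · simp [fnelGo, hs, ih acc limit h]
    · simp only [fnelGo, hs, if_false, List.filter_cons, Bool.not_eq_true']
      by_cases hl : limit ≤ ((acc ++ [PySem.Str.strip raw]).length : Int)
      · have h1 : (limit - acc.length).toNat = 1 := by
          simp at hl; omega
        rw [if_pos hl, h1]
        simp
      · rw [if_neg hl, ih _ limit (by simp at hl ⊢; omega)]
        have h1 : (limit - acc.length).toNat
            = (limit - (acc ++ [PySem.Str.strip raw]).length).toNat + 1 := by
          simp at hl ⊢; omega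
        simp [h1]

theorem headers_eq (p : String) :
    (first_non_empty_lines p 3).any (fun l => PySem.Str.isIn "Contents" l) = isToc p := by
  unfold first_non_empty_lines isToc
  rw [fnelGo_eq _ [] 3 (by simp)]
  simp

-- runEnd counts the leading trues from position e
theorem runEnd_eq (flags : List Bool) (e : Nat) :
    runEnd flags e = e + ((flags.drop e).takeWhile (fun b => b)).length := by
  by_cases h : e < flags.length
  · rw [runEnd, dif_pos h, List.drop_eq_getElem_cons h]
    by_cases hf : flags[e]
    · rw [if_pos hf, runEnd_eq flags (e + 1), hf, List.takeWhile_cons]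
      simp; omega
    · rw [if_neg hf, List.takeWhile_cons]
      simp [Bool.eq_false_iff.mpr hf] at *
  · rw [runEnd, dif_neg h, List.drop_eq_nil_of_le (by omega)]
    simp
termination_by flags.length - e

-- splitting off the head of a unit-step range
theorem pyRange_one_succ (idx : Int) (n : Nat) :
    PySem.List.pyRange idx (idx + ((n : Int) + 1)) 1
      = idx :: PySem.List.pyRange (idx + 1) (idx + 1 + (n : Int)) 1 := by
  have h1 : idx + ((n : Int) + 1) = idx + 1 + n := by ring
  rw [PySem.List.pyRange_one_cons (by omega), h1]

-- collect phase of A's loop: from a started state it appends the run of consecutive TOC pages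
theorem ftpGo_started (pages : List String) : ∀ (idx : Int) (acc : List Int),
    ftpGo pages idx true acc =
      acc ++ PySem.List.pyRange idx (idx + ((pages.map isToc).takeWhile (fun b => b)).length) 1 := by
  induction pages with
  | nil => intro idx acc; simp [ftpGo, PySem.List.pyRange_one_eq_nil]
  | cons p rest ih =>
    intro idx acc
    rw [ftpGo]
    simp only [headers_eq]
    by_cases hp : isToc p
    · rw [if_pos hp, ih (idx + 1) (acc ++ [idx]), List.map_cons, hp, List.takeWhile_cons]
      simp only [if_true, List.length_cons, Nat.cast_add, Nat.cast_one]
      rw [pyRange_one_succ]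
      simp
    · have hf : isToc p = false := by simpa using hp
      rw [if_neg hp]
      simp [List.map_cons, hf, PySem.List.pyRange_one_eq_nil]

-- B's extraction, generalized to an arbitrary 1-based offset (proof helper)
def bOfFrom (fs : List Bool) (idx : Int) : List Int :=
  match PySem.List.index? fs true with
  | none => []
  | some s => PySem.List.pyRange (idx + s) (idx + runEnd fs s) 1

theorem bOfFrom_none (fs : List Bool) (idx : Int)
    (h : PySem.List.index? fs true = none) : bOfFrom fs idx = [] := by
  unfold bOfFrom; rw [h]

theorem bOfFrom_some (fs : List Bool) (idx : Int) (s : Nat)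
    (h : PySem.List.index? fs true = some s) :
    bOfFrom fs idx = PySem.List.pyRange (idx + s) (idx + runEnd fs s) 1 := by
  unfold bOfFrom; rw [h]

theorem alt_none (early_pages : List String)
    (h : PySem.List.index? (early_pages.map isToc) true = none) :
    find_toc_pages_alt early_pages = [] := by
  show (match PySem.List.index? (early_pages.map isToc) true with
    | none => ([] : List Int)
    | some start =>
        PySem.List.pyRange ((start : Int) + 1)
          ((runEnd (early_pages.map isToc) start : Int) + 1) 1) = []
  rw [h]

theorem alt_some (early_pages : List String) (s : Nat)
    (h : PySem.List.index? (early_pages.map isToc) true = some s) :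
    find_toc_pages_alt early_pages
      = PySem.List.pyRange ((s : Int) + 1) ((runEnd (early_pages.map isToc) s : Int) + 1) 1 := by
  show (match PySem.List.index? (early_pages.map isToc) true with
    | none => ([] : List Int)
    | some start =>
        PySem.List.pyRange ((start : Int) + 1)
          ((runEnd (early_pages.map isToc) start : Int) + 1) 1) = _
  rw [h]

-- scan phase of A's loop equals B's extraction on the flag table
theorem ftpGo_scan (pages : List String) : ∀ (idx : Int),
    ftpGo pages idx false [] = bOfFrom (pages.map isToc) idx := by
  induction pages with
  | nil => intro idx; simp [ftpGo, bOfFrom, PySem.List.index?]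
  | cons p rest ih =>
    intro idx
    rw [ftpGo]
    simp only [headers_eq]
    by_cases hp : isToc p
    · rw [if_pos hp, ftpGo_started,
        bOfFrom_some _ _ 0 (by rw [List.map_cons, hp]; exact PySem.List.index?_cons_self _ _),
        runEnd_eq]
      simp only [List.drop_zero, List.map_cons, hp, List.takeWhile_cons, if_true,
        List.length_cons, Nat.cast_zero, add_zero, Nat.cast_add, Nat.cast_one,
        List.nil_append]
      rw [zero_add, pyRange_one_succ]
      simp
    · have hf : isToc p = false := by simpa using hp
      rw [if_neg hp]
      simp only [Bool.false_eq_true, if_false]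
      rw [ih (idx + 1), List.map_cons, hf]
      cases hidx : PySem.List.index? (rest.map isToc) true with
      | none =>
        rw [bOfFrom_none _ _ hidx,
          bOfFrom_none _ _ (by rw [PySem.List.index?_cons_of_ne _ (by simp), hidx]; rfl)]
      | some s =>
        rw [bOfFrom_some _ _ s hidx,
          bOfFrom_some _ _ (s + 1)
            (by rw [PySem.List.index?_cons_of_ne _ (by simp), hidx]; rfl),
          runEnd_eq, runEnd_eq, List.drop_succ_cons]
        push_cast
        congr 1 <;> omega

-- ===== VERDICT (by name: the statement is the Claim_ definition above) =====
theorem find_toc_pages_spec : Claim_equal_find_toc_pages := by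
  intro early_pages _
  unfold Spec_find_toc_pages find_toc_pages
  rw [ftpGo_scan early_pages 1]
  cases h : PySem.List.index? (early_pages.map isToc) true with
  | none => rw [bOfFrom_none _ _ h, alt_none _ h]
  | some s =>
    rw [bOfFrom_some _ _ s h, alt_some _ s h]
    congr 1 <;> omega
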